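-- pv_equiv track=rewrite | github.com/NoobyNull/Digital-Workshop | src/core/taxonomy_utils.py | split_category_and_keywords
-- ===== SOURCE A (Python) =====
-- from typing import List, Optional, Tuple
--
-- _TOP_LEVEL_CATEGORIES = {
--     "animals": "Animals",
--     "vehicles": "Vehicles",
--     "people": "People",
--     "nature": "Nature",
--     "abstract": "Abstract",
-- }
--
-- def split_category_and_keywords(raw_keywords: List[str]) -> Tuple[Optional[str], List[str]]:
--     """Split raw AI keywords into a category and remaining keywords.
--
--     The first keyword that matches a known top-level category (case-
--     insensitive) is used as the ``category``. All other non-empty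
--     keywords are returned in the order they appeared.
--
--     Args:
--         raw_keywords: List of keywords from the AI result.
--
--     Returns:
--         (category, keywords) where category is either a canonical
--         top-level category name or None if no match is found.
--     """
--
--     if not raw_keywords:
--         return None, []
--
--     category: Optional[str] = None
--     cleaned_keywords: List[str] = []
--
--     for raw in raw_keywords:
--         text = (raw or "").strip()
--         if not text:
--             continue
--
--         lower = text.lower()
--         if category is None and lower in _TOP_LEVEL_CATEGORIES:
--             category = _TOP_LEVEL_CATEGORIES[lower]
--             # Do not include the category token itself in the remaining
--             # keywords list.
--             continue
--
--         cleaned_keywords.append(text)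
--
--     return category, cleaned_keywords
-- ===== SOURCE B (Python) =====
-- _TOP_LEVEL_CATEGORIES = {
--     "animals": "Animals",
--     "vehicles": "Vehicles",
--     "people": "People",
--     "nature": "Nature",
--     "abstract": "Abstract",
-- }
--
-- def split_category_and_keywords(raw_keywords):
--     # Phase 1: cleaned list of all stripped, non-empty tokens.
--     texts = [t for t in ((k or "").strip() for k in raw_keywords) if t]
--     # Phase 2: locate the first category token, if any.
--     idx = next((i for i, t in enumerate(texts) if t.lower() in _TOP_LEVEL_CATEGORIES), None)
--     if idx is None:
--         return None, texts
--     # Phase 3: splice it out.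
--     return _TOP_LEVEL_CATEGORIES[texts[idx].lower()], texts[:idx] + texts[idx + 1:]
-- ===== Notes on version B (the rewrite author's own statement) =====
-- stated objective: alternative
-- what changed: Replaces A's single stateful loop (category flag + accumulator) by three phases: a comprehension building all cleaned tokens, a find-first-index over them, and a slice-splice removing that one token.
import Mathlib
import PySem

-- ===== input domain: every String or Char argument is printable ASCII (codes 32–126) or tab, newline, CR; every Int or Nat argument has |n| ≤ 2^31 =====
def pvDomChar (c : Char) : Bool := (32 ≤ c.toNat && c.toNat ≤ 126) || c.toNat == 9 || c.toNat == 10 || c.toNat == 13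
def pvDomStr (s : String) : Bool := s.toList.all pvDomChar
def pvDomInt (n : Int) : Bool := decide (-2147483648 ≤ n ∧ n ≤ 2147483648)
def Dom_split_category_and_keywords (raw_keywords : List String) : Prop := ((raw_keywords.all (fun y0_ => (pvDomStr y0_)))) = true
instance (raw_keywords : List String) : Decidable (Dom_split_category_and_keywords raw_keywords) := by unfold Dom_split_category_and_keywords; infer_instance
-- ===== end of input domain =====

-- B builds the cleaned token list first, then finds the index of the first category token
-- and splices it out — three phases instead of A's single stateful loop ("alternative").

-- shared module constant _TOP_LEVEL_CATEGORIES
def topLevelCategories : PySem.Dict String String :=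
  PySem.Dict.ofList [("animals", "Animals"), ("vehicles", "Vehicles"),
    ("people", "People"), ("nature", "Nature"), ("abstract", "Abstract")]

-- ===== PORT A =====
-- one pass with state (category, cleaned_keywords)
def split_category_and_keywords (raw_keywords : List String) : Option String × List String :=
  if raw_keywords = [] then (none, [])
  else
    raw_keywords.foldl
      (fun st raw =>
        let text := PySem.Str.strip raw
        if text = "" then st
        else
          let lower := PySem.Str.lower text
          match st.1, topLevelCategories.get? lower with
          | none, some c => (some c, st.2)
          | _, _ => (st.1, st.2 ++ [text]))
      (none, [])

-- ===== PORT B =====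
-- phase 1: cleaned tokens; phase 2: index of first category token; phase 3: splice
def split_category_and_keywords_alt (raw_keywords : List String) : Option String × List String :=
  let texts := (raw_keywords.map PySem.Str.strip).filter (· ≠ "")
  match texts.findIdx? (fun t => (topLevelCategories.get? (PySem.Str.lower t)).isSome) with
  | none => (none, texts)
  | some i => (topLevelCategories.get? (PySem.Str.lower (texts.getD i "")),
               texts.take i ++ texts.drop (i + 1))

-- ===== PRECONDITION & SPEC =====
def Spec_split_category_and_keywords (raw_keywords : List String) (out : Option String × List String) : Prop := out = split_category_and_keywords_alt raw_keywords
instance (raw_keywords : List String) (out : Option String × List String) : Decidable (Spec_split_category_and_keywords raw_keywords out) := by unfold Spec_split_category_and_keywords; infer_instance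

-- ===== CLAIM (what is proved, stated in full; the proofs are below) =====
def Claim_equal_split_category_and_keywords : Prop := ∀ (raw_keywords : List String), Dom_split_category_and_keywords raw_keywords → Spec_split_category_and_keywords raw_keywords (split_category_and_keywords raw_keywords)

-- ===== LEMMAS AND PROOFS =====

-- A's loop body, named for the proofs
def stepA (st : Option String × List String) (raw : String) : Option String × List String :=
  let text := PySem.Str.strip raw
  if text = "" then st
  else
    let lower := PySem.Str.lower text
    match st.1, topLevelCategories.get? lower with
    | none, some c => (some c, st.2)
    | _, _ => (st.1, st.2 ++ [text])

-- cleaned tokens of a list (B's phase 1)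
def textsOf (l : List String) : List String := (l.map PySem.Str.strip).filter (· ≠ "")

def isCat (t : String) : Bool := (topLevelCategories.get? (PySem.Str.lower t)).isSome

-- once a category is found, A only appends the remaining cleaned tokens
theorem foldl_stepA_some (l : List String) (c : String) (acc : List String) :
    l.foldl stepA (some c, acc) = (some c, acc ++ textsOf l) := by
  induction l generalizing acc with
  | nil => simp [textsOf]
  | cons r rs ih =>
    simp only [List.foldl_cons, stepA, textsOf, List.map_cons, List.filter_cons]
    by_cases h : PySem.Str.strip r = ""
    · simp [h, ih, textsOf]
    · simp [h, ih, textsOf]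

-- A's loop from the searching state equals B's find-then-splice
theorem foldl_stepA_none (l : List String) (acc : List String) :
    l.foldl stepA (none, acc) =
      match (textsOf l).findIdx? isCat with
      | none => (none, acc ++ textsOf l)
      | some i => (topLevelCategories.get? (PySem.Str.lower ((textsOf l).getD i "")),
                   acc ++ ((textsOf l).take i ++ (textsOf l).drop (i + 1))) := by
  induction l generalizing acc with
  | nil => simp [textsOf]
  | cons r rs ih =>
    simp only [List.foldl_cons]
    by_cases h : PySem.Str.strip r = ""
    · have hx : textsOf (r :: rs) = textsOf rs := by simp [textsOf, h]
      have hst : stepA (none, acc) r = (none, acc) := by simp [stepA, h]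
      rw [hst, hx, ih]
    · have hx : textsOf (r :: rs) = PySem.Str.strip r :: textsOf rs := by
        simp [textsOf, h]
      rw [hx]
      by_cases hc : isCat (PySem.Str.strip r)
      · obtain ⟨v, hv⟩ : ∃ v, topLevelCategories.get? (PySem.Str.lower (PySem.Str.strip r)) = some v := by
          simpa [isCat, Option.isSome_iff_exists] using hc
        have hst : stepA (none, acc) r = (some v, acc) := by
          simp [stepA, h, hv]
        rw [hst, foldl_stepA_some]
        simp [List.findIdx?_cons, hc, hv]
      · have hst : stepA (none, acc) r = (none, acc ++ [PySem.Str.strip r]) := by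
          have : topLevelCategories.get? (PySem.Str.lower (PySem.Str.strip r)) = none := by
            simpa [isCat, Option.isSome_iff_exists, Option.eq_none_iff_forall_ne_some] using hc
          simp [stepA, h, this]
        rw [hst, ih]
        simp only [List.findIdx?_cons, hc]
        cases hfi : (textsOf rs).findIdx? isCat with
        | none => simp
        | some i => simp [List.take_succ_cons]

-- ===== VERDICT (by name: the statement is the Claim_ definition above) =====
theorem split_category_and_keywords_spec : Claim_equal_split_category_and_keywords := by
  intro l _
  show split_category_and_keywords l = split_category_and_keywords_alt l
  unfold split_category_and_keywords split_category_and_keywords_alt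
  by_cases hl : l = []
  · subst hl; simp
  · simp only [hl, if_false]
    have := foldl_stepA_none l []
    simp only [List.nil_append] at this
    have hfold : l.foldl (fun st raw =>
        let text := PySem.Str.strip raw
        if text = "" then st
        else
          let lower := PySem.Str.lower text
          match st.1, topLevelCategories.get? lower with
          | none, some c => (some c, st.2)
          | _, _ => (st.1, st.2 ++ [text])) (none, []) = l.foldl stepA (none, []) := rfl
    rw [hfold, this]
    rfl
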